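-- pv_equiv track=rewrite | github.com/langjam/jam0003 | core/core.py | valid_string
-- ===== SOURCE A (Python) =====
-- def valid_string(x):
--   if x is None: return False
--   is_quote = False
--   for i in x:
--     if i == "\"": is_quote = not is_quote
--     else:
--       if not is_quote: return False
--   if is_quote: return False
--   else: return True
-- ===== SOURCE B (Python) =====
-- def valid_string(x):
--     if x is None:
--         return False
--     parts = x.split('"')
--     return len(parts) % 2 == 1 and all(p == '' for p in parts[::2])
-- ===== Notes on version B (the rewrite author's own statement) =====
-- stated objective: simpler
-- what changed: Replaces the char-by-char scan with a toggling in-quote flag and early returns by one split on the double-quote character: the number of split parts must be odd (even quote count) and every even-indexed part (text outside quotes) must be empty.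
import Mathlib
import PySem

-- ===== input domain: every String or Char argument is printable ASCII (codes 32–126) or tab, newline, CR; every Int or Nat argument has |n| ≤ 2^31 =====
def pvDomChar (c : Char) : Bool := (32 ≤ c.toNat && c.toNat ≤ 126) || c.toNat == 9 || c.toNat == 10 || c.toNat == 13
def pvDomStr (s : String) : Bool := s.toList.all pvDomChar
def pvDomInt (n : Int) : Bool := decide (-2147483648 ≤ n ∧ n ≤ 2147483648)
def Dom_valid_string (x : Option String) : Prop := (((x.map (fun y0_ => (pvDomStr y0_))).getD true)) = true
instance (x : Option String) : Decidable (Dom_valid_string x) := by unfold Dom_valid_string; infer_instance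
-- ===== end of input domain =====

-- B replaces A's char-by-char scan with a toggling flag by one split on '"':
-- odd number of parts (even quote count) and every even-indexed part empty. Objective: simpler.


-- ===== PORT A =====
-- A's for-loop with its early returns and the toggling is_quote flag
def validStringLoop : List Char → Bool → Bool
  | [], q => !q                       -- "if is_quote: return False / else: return True"
  | c :: cs, q =>
      if c == '"' then validStringLoop cs (!q)
      else if !q then false
      else validStringLoop cs q

def valid_string (x : Option String) : Bool :=
  match x with
  | none => false
  | some s => validStringLoop s.toList false

-- ===== PORT B =====
-- x.split('"') with a one-char separator is List.splitOn '"'; parts[::2] is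
-- PySem.List.slice? with step 2 (step = 2 ≠ 0, so it is always `some`, hence .getD []).
def valid_string_alt (x : Option String) : Bool :=
  match x with
  | none => false
  | some s =>
      let parts := List.splitOn '"' s.toList
      decide (parts.length % 2 = 1) &&
        ((PySem.List.slice? parts none none 2).getD []).all (· == [])

-- ===== PRECONDITION & SPEC =====
def Spec_valid_string (x : Option String) (out : Bool) : Prop := out = valid_string_alt x
instance (x : Option String) (out : Bool) : Decidable (Spec_valid_string x out) := by unfold Spec_valid_string; infer_instance

-- ===== CLAIM (what is proved, stated in full; the proofs are below) =====
def Claim_equal_valid_string : Prop := ∀ (x : Option String), Dom_valid_string x → Spec_valid_string x (valid_string x)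

-- ===== LEMMAS AND PROOFS =====

-- the even-indexed / odd-indexed elements of a list
mutual
def pvEvens : List (List Char) → List (List Char)
  | [] => []
  | a :: l => a :: pvOdds l
def pvOdds : List (List Char) → List (List Char)
  | [] => []
  | _ :: l => pvEvens l
end

theorem pvFilterMap_two (xs : List (List Char)) :
    List.filterMap (fun k : Nat => xs[2*k]?) (List.range ((xs.length + 1) / 2))
      = pvEvens xs := by
  match xs with
  | [] => simp [pvEvens]
  | [a] => simp [pvEvens, pvOdds]
  | a :: b :: l =>
      have hdiv : ((a :: b :: l).length + 1) / 2 = (l.length + 1) / 2 + 1 := by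
        simp; omega
      rw [hdiv, List.range_succ_eq_map, List.filterMap_cons]
      simp only [Nat.mul_zero, List.getElem?_cons_zero, List.filterMap_map]
      rw [List.filterMap_congr (g := fun k : Nat => l[2*k]?) (by
        intro k _
        show (a :: b :: l)[2*(k+1)]? = l[2*k]?
        rw [show 2*(k+1) = (2*k) + 2 by omega]
        simp)]
      rw [pvFilterMap_two l]
      rfl

-- parts[::2] (slice with step 2) selects exactly the even-indexed elements
theorem pvSlice_two (xs : List (List Char)) :
    PySem.List.slice? xs none none 2 = some (pvEvens xs) := by
  unfold PySem.List.slice?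
  have hidx : PySem.List.sliceIndices xs.length none none 2 = (0, (xs.length : ℤ), 2) := by
    simp [PySem.List.sliceIndices]
  rw [if_neg (by norm_num), hidx]
  simp only
  have hcount : (if (0:ℤ) < 2 then if (0:ℤ) < (xs.length:ℤ) then ((((xs.length:ℤ) - 0 + 2 - 1) / 2)).toNat else 0
      else if (xs.length:ℤ) < 0 then (((0:ℤ) - (xs.length:ℤ) + -2 - 1) / -2).toNat else 0) = (xs.length + 1) / 2 := by
    split_ifs with h1 h2 h3 <;> omega
  rw [hcount]
  congr 1
  rw [show (fun (k : ℕ) => xs[((0:ℤ) + 2 * (k:ℤ)).toNat]?) = (fun (k : ℕ) => xs[2*k]?) from by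
    funext k
    congr 1
    omega]
  exact pvFilterMap_two xs

-- the loop invariant: A's scan with flag q equals the split-based parity/emptiness check
theorem pvLoop_eq (l : List Char) (q : Bool) :
    validStringLoop l q =
      (if q then
        decide ((List.splitOnP (· == '"') l).length % 2 = 0) && (pvOdds (List.splitOnP (· == '"') l)).all (· == [])
      else
        decide ((List.splitOnP (· == '"') l).length % 2 = 1) && (pvEvens (List.splitOnP (· == '"') l)).all (· == [])) := by
  induction l generalizing q with
  | nil =>
      cases q <;> simp [validStringLoop, List.splitOnP_nil, pvEvens, pvOdds]
  | cons c cs ih =>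
      obtain ⟨h, t, hP⟩ : ∃ h t, List.splitOnP (· == '"') cs = h :: t := by
        cases hE : List.splitOnP (· == '"') cs with
        | nil => exact absurd hE (List.splitOnP_ne_nil _ _)
        | cons h t => exact ⟨h, t, rfl⟩
      by_cases hc : c = '"'
      · subst hc
        cases q
        · rw [show validStringLoop ('"' :: cs) false = validStringLoop cs true from rfl, ih]
          simp only [List.splitOnP_cons, hP]
          simp [pvEvens, pvOdds, Nat.succ_mod_two_eq_one_iff, Nat.succ_mod_two_eq_zero_iff]
        · rw [show validStringLoop ('"' :: cs) true = validStringLoop cs false from rfl, ih]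
          simp only [List.splitOnP_cons, hP]
          simp [pvEvens, pvOdds, Nat.succ_mod_two_eq_one_iff, Nat.succ_mod_two_eq_zero_iff]
      · cases q
        · rw [show validStringLoop (c :: cs) false = (if c == '"' then validStringLoop cs true else false) from rfl]
          simp only [List.splitOnP_cons, hP]
          simp [hc]
          intro _
          exact ⟨c :: h, by simp [pvEvens], by simp⟩
        · rw [show validStringLoop (c :: cs) true = (if c == '"' then validStringLoop cs false else validStringLoop cs true) from rfl]
          simp only [List.splitOnP_cons, hP]
          simp [hc, ih, hP, pvOdds]

-- ===== VERDICT (by name: the statement is the Claim_ definition above) =====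
theorem valid_string_spec : Claim_equal_valid_string := by
  intro x _
  unfold Spec_valid_string
  cases x with
  | none => rfl
  | some s =>
      show validStringLoop s.toList false = _
      rw [pvLoop_eq]
      show _ = (decide ((List.splitOn '"' s.toList).length % 2 = 1) &&
        ((PySem.List.slice? (List.splitOn '"' s.toList) none none 2).getD []).all (· == []))
      rw [List.splitOn, pvSlice_two]
      simp
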